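-- pv_equiv track=rewrite | github.com/dnsev-h/eze | src/string_compress.py | escape_quote
-- ===== SOURCE A (Python) =====
-- def escape_quote(string, quote):
-- 	i = 0;
-- 	escaped = False;
-- 	string_len = len(string);
-- 	last_pos = 0;
-- 	parts = [];
--
-- 	while (i < string_len):
-- 		c = string[i];
-- 		if (escaped):
-- 			escaped = False;
-- 			if (c == "\n"):
-- 				parts.append(string[last_pos : i]);
-- 				last_pos = i + 1;
-- 			elif (c == "\r"):
-- 				parts.append(string[last_pos : i]);
-- 				if (i + 1 < string_len and string[i + 1] == "\n"):
-- 					i += 1;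
-- 				last_pos = i + 1;
-- 		else:
-- 			if (c == "\\"):
-- 				escaped = True;
-- 			elif (c == quote):
-- 				parts.append(string[last_pos : i]);
-- 				parts.append("\\");
-- 				last_pos = i;
--
-- 		# Next
-- 		i += 1;
--
-- 	if (len(parts) > 0):
-- 		parts.append(string[last_pos : ]);
-- 		return "".join(parts);
-- 	else:
-- 		return string;
-- ===== SOURCE B (Python) =====
-- def escape_quote(string, quote):
-- 	out = []
-- 	i = 0
-- 	n = len(string)
-- 	while i < n:
-- 		c = string[i]
-- 		if c == "\\":
-- 			if i + 1 < n:
-- 				d = string[i + 1]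
-- 				if d == "\n":
-- 					out.append("\\")
-- 					i += 2
-- 				elif d == "\r":
-- 					out.append("\\")
-- 					i += 3 if i + 2 < n and string[i + 2] == "\n" else 2
-- 				else:
-- 					out.append("\\")
-- 					out.append(d)
-- 					i += 2
-- 			else:
-- 				out.append("\\")
-- 				i += 1
-- 		elif c == quote:
-- 			out.append("\\")
-- 			out.append(c)
-- 			i += 1
-- 		else:
-- 			out.append(c)
-- 			i += 1
-- 	return "".join(out)
-- ===== Notes on version B (the rewrite author's own statement) =====
-- stated objective: simpler
-- what changed: A is a two-state (escaped flag) machine that records flush points and rebuilds the string from slices between them; B is a stateless one-pass lookahead scanner that consumes each backslash together with the character(s) it escapes and emits the output directly.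
import Mathlib
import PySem

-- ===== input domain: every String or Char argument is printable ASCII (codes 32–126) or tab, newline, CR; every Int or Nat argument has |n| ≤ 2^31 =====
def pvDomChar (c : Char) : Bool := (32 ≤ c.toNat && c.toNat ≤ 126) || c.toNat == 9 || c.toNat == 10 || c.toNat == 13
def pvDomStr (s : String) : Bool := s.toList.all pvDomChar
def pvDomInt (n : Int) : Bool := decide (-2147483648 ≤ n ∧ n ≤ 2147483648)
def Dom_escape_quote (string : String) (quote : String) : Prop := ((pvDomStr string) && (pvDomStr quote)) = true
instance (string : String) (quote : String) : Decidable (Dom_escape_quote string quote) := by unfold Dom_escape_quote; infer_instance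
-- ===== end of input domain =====

set_option maxHeartbeats 1000000
set_option maxRecDepth 4000

-- B rewrites A's escaped-flag state machine with slice bookkeeping as a single lookahead
-- scanner that consumes each backslash together with the character(s) it escapes and emits
-- output directly (objective: simpler).

-- ===== PORT A =====
-- string[a : b] for the in-range indices 0 ≤ a ≤ b ≤ len(s) that A uses (exact there)
def pySeg (s : List Char) (a b : Nat) : List Char := (s.drop a).take (b - a)

-- A's while-loop: state (i, escaped, last_pos, parts); returns the final (parts, last_pos).
-- The loop runs while i < len(s) and i strictly increases, so fuel = len(s) (spent one per
-- iteration) never runs out before the loop's own exit test; `s[i]? = none` is that test.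
-- `i + 1 < n and string[i+1] == "\n"` is rendered with optional indexing s[i+1]? = some '\n'.
def aLoop (s : List Char) (quote : String) :
    Nat → Nat → Bool → Nat → List (List Char) → List (List Char) × Nat
  | 0, _, _, last_pos, parts => (parts, last_pos)
  | fuel + 1, i, escaped, last_pos, parts =>
    match s[i]? with
    | none => (parts, last_pos)
    | some c =>
      if escaped then
        if c = '\n' then
          aLoop s quote fuel (i + 1) false (i + 1) (parts ++ [pySeg s last_pos i])
        else if c = '\r' then
          if s[i + 1]? = some '\n' then
            aLoop s quote fuel (i + 2) false (i + 2) (parts ++ [pySeg s last_pos i])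
          else
            aLoop s quote fuel (i + 1) false (i + 1) (parts ++ [pySeg s last_pos i])
        else
          aLoop s quote fuel (i + 1) false last_pos parts
      else
        if c = '\\' then
          aLoop s quote fuel (i + 1) true last_pos parts
        else if String.ofList [c] = quote then
          aLoop s quote fuel (i + 1) false i (parts ++ [pySeg s last_pos i, ['\\']])
        else
          aLoop s quote fuel (i + 1) false last_pos parts

-- parts are carried as List (List Char); "".join(parts) is their flatten
def escape_quote (string : String) (quote : String) : String :=
  let s := string.toList
  let r := aLoop s quote s.length 0 false 0 []
  if r.1.length > 0 then String.ofList ((r.1 ++ [s.drop r.2]).flatten) else string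

-- ===== PORT B =====
-- B's while-loop over the remaining characters (index i ↦ the suffix string[i:]),
-- with the output list `out` as accumulator; the lookaheads string[i+1] and
-- `i + 2 < n and string[i+2] == "\n"` become pattern lookahead on the suffix.
def bLoop (quote : String) (out : List Char) : List Char → List Char
  | [] => out
  | '\\' :: '\n' :: rest => bLoop quote (out ++ ['\\']) rest
  | '\\' :: '\r' :: '\n' :: rest => bLoop quote (out ++ ['\\']) rest
  | '\\' :: '\r' :: rest => bLoop quote (out ++ ['\\']) rest
  | '\\' :: d :: rest => bLoop quote (out ++ ['\\', d]) rest
  | ['\\'] => out ++ ['\\']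
  | c :: rest =>
    if String.ofList [c] = quote then bLoop quote (out ++ ['\\', c]) rest
    else bLoop quote (out ++ [c]) rest

def escape_quote_alt (string : String) (quote : String) : String :=
  String.ofList (bLoop quote [] string.toList)

-- ===== PRECONDITION & SPEC =====
def Spec_escape_quote (string : String) (quote : String) (out : String) : Prop := out = escape_quote_alt string quote
instance (string : String) (quote : String) (out : String) : Decidable (Spec_escape_quote string quote out) := by unfold Spec_escape_quote; infer_instance

-- ===== CLAIM (what is proved, stated in full; the proofs are below) =====
def Claim_equal_escape_quote : Prop := ∀ (string : String) (quote : String), Dom_escape_quote string quote → Spec_escape_quote string quote (escape_quote string quote)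

-- ===== LEMMAS AND PROOFS =====

-- one-step equations of bLoop
theorem bLoop_nil (q : String) (acc : List Char) : bLoop q acc [] = acc := rfl


theorem bLoop_bs_nil (q : String) (acc : List Char) : bLoop q acc ['\\'] = acc ++ ['\\'] := rfl

theorem bLoop_bs_nl (q : String) (acc t : List Char) :
    bLoop q acc ('\\' :: '\n' :: t) = bLoop q (acc ++ ['\\']) t := rfl

theorem bLoop_bs_crnl (q : String) (acc t : List Char) :
    bLoop q acc ('\\' :: '\r' :: '\n' :: t) = bLoop q (acc ++ ['\\']) t := rfl

theorem bLoop_bs_cr_nil (q : String) (acc : List Char) :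
    bLoop q acc ['\\', '\r'] = bLoop q (acc ++ ['\\']) [] := rfl

theorem bLoop_bs_cr_other (q : String) (acc t : List Char) (x : Char) (hx : x ≠ '\n') :
    bLoop q acc ('\\' :: '\r' :: x :: t) = bLoop q (acc ++ ['\\']) (x :: t) := by
  rw [bLoop.eq_def]; simp [hx]

theorem bLoop_bs_other (q : String) (acc t : List Char) (d : Char) (h1 : d ≠ '\n') (h2 : d ≠ '\r') :
    bLoop q acc ('\\' :: d :: t) = bLoop q (acc ++ ['\\', d]) t := by
  rw [bLoop.eq_def]; simp [h1, h2]

theorem bLoop_char (q : String) (acc t : List Char) (c : Char) (hc : c ≠ '\\') :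
    bLoop q acc (c :: t)
      = if String.ofList [c] = q then bLoop q (acc ++ ['\\', c]) t else bLoop q (acc ++ [c]) t := by
  rw [bLoop.eq_def]; simp [hc]

-- the accumulator only collects already-produced output on the left
theorem bLoop_acc_aux (q : String) :
    ∀ (n : Nat) (l : List Char), l.length ≤ n →
      ∀ acc₁ acc₂, bLoop q (acc₁ ++ acc₂) l = acc₁ ++ bLoop q acc₂ l := by
  intro n
  induction n with
  | zero =>
    intro l hl acc₁ acc₂
    have hnil : l = [] := by cases l with | nil => rfl | cons a b => simp at hl
    subst hnil; simp [bLoop_nil]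
  | succ n ih =>
    intro l hl acc₁ acc₂
    match l with
    | [] => simp [bLoop_nil]
    | c :: rest =>
      by_cases hc : c = '\\'
      · subst hc
        match rest with
        | [] => simp [bLoop_bs_nil]
        | d :: t =>
          by_cases h1 : d = '\n'
          · subst h1
            have ht : t.length ≤ n := by simp at hl; omega
            rw [bLoop_bs_nl, bLoop_bs_nl, List.append_assoc]
            exact ih t ht acc₁ (acc₂ ++ ['\\'])
          · by_cases h2 : d = '\r'
            · subst h2
              match t with
              | [] => simp [bLoop_bs_cr_nil, bLoop_nil]
              | '\n' :: r =>
                have hr : r.length ≤ n := by simp at hl; omega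
                rw [bLoop_bs_crnl, bLoop_bs_crnl, List.append_assoc]
                exact ih r hr acc₁ (acc₂ ++ ['\\'])
              | x :: r =>
                by_cases hx : x = '\n'
                · subst hx
                  have hr : r.length ≤ n := by simp at hl; omega
                  rw [bLoop_bs_crnl, bLoop_bs_crnl, List.append_assoc]
                  exact ih r hr acc₁ (acc₂ ++ ['\\'])
                · have hr : (x :: r).length ≤ n := by simp at hl ⊢; omega
                  rw [bLoop_bs_cr_other q _ _ _ hx, bLoop_bs_cr_other q _ _ _ hx,
                    List.append_assoc]
                  exact ih (x :: r) hr acc₁ (acc₂ ++ ['\\'])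
            · have ht : t.length ≤ n := by simp at hl; omega
              rw [bLoop_bs_other q _ _ _ h1 h2, bLoop_bs_other q _ _ _ h1 h2,
                List.append_assoc]
              exact ih t ht acc₁ (acc₂ ++ ['\\', d])
      · have ht : rest.length ≤ n := by simp at hl; omega
        rw [bLoop_char q _ _ _ hc, bLoop_char q _ _ _ hc]
        split
        · rw [List.append_assoc]; exact ih rest ht acc₁ (acc₂ ++ ['\\', c])
        · rw [List.append_assoc]; exact ih rest ht acc₁ (acc₂ ++ [c])

theorem bLoop_acc (q : String) (acc l : List Char) : bLoop q acc l = acc ++ bLoop q [] l := by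
  have h := bLoop_acc_aux q l.length l le_rfl acc []
  simpa using h

-- bLoop with empty accumulator, cons-producing forms
theorem go_nil (q : String) : bLoop q [] ([] : List Char) = [] := rfl

theorem go_bs (q : String) : bLoop q [] ['\\'] = ['\\'] := rfl

theorem go_nl (q : String) (t : List Char) :
    bLoop q [] ('\\' :: '\n' :: t) = '\\' :: bLoop q [] t := by
  rw [bLoop_bs_nl, bLoop_acc]; rfl

theorem go_crnl (q : String) (t : List Char) :
    bLoop q [] ('\\' :: '\r' :: '\n' :: t) = '\\' :: bLoop q [] t := by
  rw [bLoop_bs_crnl, bLoop_acc]; rfl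

theorem go_cr_neg (q : String) (t : List Char) (h : t.head? ≠ some '\n') :
    bLoop q [] ('\\' :: '\r' :: t) = '\\' :: bLoop q [] t := by
  match t with
  | [] => rfl
  | x :: r =>
    have hx : x ≠ '\n' := by simpa using h
    rw [bLoop_bs_cr_other q _ _ _ hx, bLoop_acc]; rfl

theorem go_other (q : String) (t : List Char) (d : Char) (h1 : d ≠ '\n') (h2 : d ≠ '\r') :
    bLoop q [] ('\\' :: d :: t) = '\\' :: d :: bLoop q [] t := by
  rw [bLoop_bs_other q _ _ _ h1 h2, bLoop_acc]; rfl

theorem go_char (q : String) (t : List Char) (c : Char) (hc : c ≠ '\\') :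
    bLoop q [] (c :: t)
      = if String.ofList [c] = q then '\\' :: c :: bLoop q [] t else c :: bLoop q [] t := by
  rw [bLoop_char q _ _ _ hc]
  split <;> rw [bLoop_acc] <;> rfl

-- slice algebra for pySeg
theorem pySeg_refl (s : List Char) (a : Nat) : pySeg s a a = [] := by simp [pySeg]

theorem pySeg_all (s : List Char) (a : Nat) : pySeg s a s.length = s.drop a := by
  unfold pySeg
  exact List.take_of_length_le (by simp)

theorem pySeg_snoc (s : List Char) (a b : Nat) (hab : a ≤ b) (hb : b < s.length) :
    pySeg s a b ++ [s[b]] = pySeg s a (b + 1) := by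
  unfold pySeg
  have h1 : b + 1 - a = (b - a) + 1 := by omega
  rw [h1, List.take_succ]
  have h2 : (s.drop a)[b - a]? = some s[b] := by
    rw [List.getElem?_drop]
    have hab' : a + (b - a) = b := by omega
    rw [hab', List.getElem?_eq_getElem hb]
  rw [h2]
  rfl

theorem some_getElem {s : List Char} {i : Nat} {c : Char} (h : s[i]? = some c) :
    i < s.length ∧ s[i]! = c := by
  rcases List.getElem?_eq_some_iff.mp h with ⟨h1, h2⟩
  exact ⟨h1, by simp [List.getElem!_eq_getElem?_getD, h]⟩

-- one-step equations of aLoop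
theorem aLoop_zero (s : List Char) (q : String) (i lp : Nat) (esc : Bool)
    (parts : List (List Char)) : aLoop s q 0 i esc lp parts = (parts, lp) := rfl

theorem aLoop_stop (s : List Char) (q : String) (fuel i lp : Nat) (esc : Bool)
    (parts : List (List Char)) (hin : ¬ i < s.length) :
    aLoop s q (fuel + 1) i esc lp parts = (parts, lp) := by
  rw [aLoop, List.getElem?_eq_none (by omega)]

theorem aLoop_esc_nl (s : List Char) (q : String) (fuel i lp : Nat) (parts : List (List Char))
    (hin : i < s.length) (h : s[i] = '\n') :
    aLoop s q (fuel + 1) i true lp parts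
      = aLoop s q fuel (i + 1) false (i + 1) (parts ++ [pySeg s lp i]) := by
  rw [aLoop, List.getElem?_eq_getElem hin]; simp [h]

theorem aLoop_esc_crnl (s : List Char) (q : String) (fuel i lp : Nat) (parts : List (List Char))
    (hin : i < s.length) (h : s[i] = '\r') (h2 : s[i + 1]? = some '\n') :
    aLoop s q (fuel + 1) i true lp parts
      = aLoop s q fuel (i + 2) false (i + 2) (parts ++ [pySeg s lp i]) := by
  rw [aLoop, List.getElem?_eq_getElem hin]; simp [h, h2]

theorem aLoop_esc_cr (s : List Char) (q : String) (fuel i lp : Nat) (parts : List (List Char))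
    (hin : i < s.length) (h : s[i] = '\r') (h2 : ¬ s[i + 1]? = some '\n') :
    aLoop s q (fuel + 1) i true lp parts
      = aLoop s q fuel (i + 1) false (i + 1) (parts ++ [pySeg s lp i]) := by
  rw [aLoop, List.getElem?_eq_getElem hin]; simp [h, h2]

theorem aLoop_esc_other (s : List Char) (q : String) (fuel i lp : Nat) (parts : List (List Char))
    (hin : i < s.length) (h1 : ¬ s[i] = '\n') (h2 : ¬ s[i] = '\r') :
    aLoop s q (fuel + 1) i true lp parts = aLoop s q fuel (i + 1) false lp parts := by
  rw [aLoop, List.getElem?_eq_getElem hin]; simp [h1, h2]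

theorem aLoop_bs (s : List Char) (q : String) (fuel i lp : Nat) (parts : List (List Char))
    (hin : i < s.length) (h : s[i] = '\\') :
    aLoop s q (fuel + 1) i false lp parts = aLoop s q fuel (i + 1) true lp parts := by
  rw [aLoop, List.getElem?_eq_getElem hin]; simp [h]

theorem aLoop_quote (s : List Char) (q : String) (fuel i lp : Nat) (parts : List (List Char))
    (hin : i < s.length) (h : ¬ s[i] = '\\') (hq : String.ofList [s[i]] = q) :
    aLoop s q (fuel + 1) i false lp parts
      = aLoop s q fuel (i + 1) false i (parts ++ [pySeg s lp i, ['\\']]) := by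
  rw [aLoop, List.getElem?_eq_getElem hin]; simp [h, hq]

theorem aLoop_plain (s : List Char) (q : String) (fuel i lp : Nat) (parts : List (List Char))
    (hin : i < s.length) (h : ¬ s[i] = '\\') (hq : ¬ String.ofList [s[i]] = q) :
    aLoop s q (fuel + 1) i false lp parts = aLoop s q fuel (i + 1) false lp parts := by
  rw [aLoop, List.getElem?_eq_getElem hin]; simp [h, hq]

-- A's final assembly at loop exit (i = length)
theorem aLoop_go_base (s : List Char) (q : String) (lp : Nat) (escaped : Bool)
    (parts : List (List Char))
    (hlp : lp ≤ (if escaped = true then s.length - 1 else s.length))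
    (hesc : escaped = true → 1 ≤ s.length ∧ s[s.length - 1]? = some '\\')
    (hp : parts = [] → lp = 0)
    (hinv : bLoop q [] s =
      parts.flatten ++ pySeg s lp (if escaped = true then s.length - 1 else s.length)
        ++ bLoop q [] (s.drop (if escaped = true then s.length - 1 else s.length))) :
    (if parts.length > 0 then (parts ++ [s.drop lp]).flatten else s) = bLoop q [] s := by
  by_cases hp0 : parts = []
  · subst hp0
    have hlp0 : lp = 0 := hp rfl
    subst hlp0
    rw [if_neg (by simp)]
    cases escaped with
    | false =>
      rw [if_neg (by simp)] at hinv
      rw [hinv]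
      simp [pySeg_all, go_nil]
    | true =>
      rw [if_pos rfl] at hinv hlp
      obtain ⟨h1, hprev⟩ := hesc rfl
      obtain ⟨hlt, hget⟩ := some_getElem hprev
      have hgetprev : s[s.length - 1]'hlt = '\\' := by
        rw [← hget]; simp [List.getElem!_eq_getElem?_getD, List.getElem?_eq_getElem hlt]
      have hdrop1 : s.drop (s.length - 1) = ['\\'] := by
        rw [List.drop_eq_getElem_cons hlt, hgetprev,
          show s.length - 1 + 1 = s.length by omega, List.drop_length]
      have hseg1 : pySeg s 0 (s.length - 1) ++ ['\\'] = s := by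
        have h2 := pySeg_snoc s 0 (s.length - 1) (Nat.zero_le _) hlt
        rw [hgetprev, show s.length - 1 + 1 = s.length by omega, pySeg_all] at h2
        simpa using h2
      rw [hinv, hdrop1, go_bs]
      simpa using hseg1.symm
  · rw [if_pos (by simpa [List.length_pos_iff] using hp0)]
    cases escaped with
    | false =>
      rw [if_neg (by simp)] at hinv
      rw [hinv]
      simp [pySeg_all, go_nil]
    | true =>
      rw [if_pos rfl] at hinv hlp
      obtain ⟨h1, hprev⟩ := hesc rfl
      obtain ⟨hlt, hget⟩ := some_getElem hprev
      have hgetprev : s[s.length - 1]'hlt = '\\' := by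
        rw [← hget]; simp [List.getElem!_eq_getElem?_getD, List.getElem?_eq_getElem hlt]
      have hdrop1 : s.drop (s.length - 1) = ['\\'] := by
        rw [List.drop_eq_getElem_cons hlt, hgetprev,
          show s.length - 1 + 1 = s.length by omega, List.drop_length]
      have hseg1 : pySeg s lp (s.length - 1) ++ ['\\'] = s.drop lp := by
        have h2 := pySeg_snoc s lp (s.length - 1) hlp hlt
        rw [hgetprev, show s.length - 1 + 1 = s.length by omega, pySeg_all] at h2
        exact h2
      rw [hinv, hdrop1, go_bs, ← hseg1]
      simp

-- MAIN INVARIANT: at any loop state of A, the joined flushed parts followed by the pending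
-- raw segment and B's scan of the unseen suffix equal B's scan of the whole string;
-- hence A's final assembly equals B's output.
theorem aLoop_go (s : List Char) (q : String) :
    ∀ (fuel i lp : Nat) (escaped : Bool) (parts : List (List Char)),
      s.length - i ≤ fuel → i ≤ s.length →
      lp ≤ (if escaped = true then i - 1 else i) →
      (escaped = true → 1 ≤ i ∧ s[i - 1]? = some '\\') →
      (parts = [] → lp = 0) →
      bLoop q [] s =
        parts.flatten ++ pySeg s lp (if escaped = true then i - 1 else i)
          ++ bLoop q [] (s.drop (if escaped = true then i - 1 else i)) →
      (if (aLoop s q fuel i escaped lp parts).1.length > 0 then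
        ((aLoop s q fuel i escaped lp parts).1
          ++ [s.drop (aLoop s q fuel i escaped lp parts).2]).flatten
       else s) = bLoop q [] s := by
  intro fuel
  induction fuel with
  | zero =>
    intro i lp esc parts hfuel hi hlp hesc hp hinv
    have hieq : i = s.length := by omega
    subst hieq
    rw [aLoop_zero]
    exact aLoop_go_base s q lp esc parts hlp hesc hp hinv
  | succ fuel ih =>
    intro i lp esc parts hfuel hi hlp hesc hp hinv
    by_cases hin : i < s.length
    · have hdropi : s.drop i = s[i] :: s.drop (i + 1) := List.drop_eq_getElem_cons hin
      cases esc with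
      | true =>
        rw [if_pos rfl] at hlp hinv
        obtain ⟨hi1, hprev⟩ := hesc rfl
        obtain ⟨him1, hget⟩ := some_getElem hprev
        have hgetprev : s[i - 1]'him1 = '\\' := by
          rw [← hget]; simp [List.getElem!_eq_getElem?_getD, List.getElem?_eq_getElem him1]
        have hdrop1 : s.drop (i - 1) = '\\' :: s.drop i := by
          rw [List.drop_eq_getElem_cons him1, hgetprev, show i - 1 + 1 = i by omega]
        have hseg : pySeg s lp (i - 1) ++ ['\\'] = pySeg s lp i := by
          have h2 := pySeg_snoc s lp (i - 1) hlp him1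
          rw [hgetprev, show i - 1 + 1 = i by omega] at h2
          exact h2
        by_cases hnl : s[i] = '\n'
        · rw [aLoop_esc_nl s q fuel i lp parts hin hnl]
          apply ih (i + 1) (i + 1) false _ (by omega) (by omega) (by simp) (by simp)
            (by intro h; simp at h)
          rw [hinv, hdrop1, hdropi, hnl, go_nl, ← hseg]
          simp [pySeg_refl]
        · by_cases hcr : s[i] = '\r'
          · by_cases hnext : s[i + 1]? = some '\n'
            · rw [aLoop_esc_crnl s q fuel i lp parts hin hcr hnext]
              obtain ⟨hi2, hget2⟩ := some_getElem hnext
              have hgetnext : s[i + 1]'hi2 = '\n' := by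
                rw [← hget2]; simp [List.getElem!_eq_getElem?_getD, List.getElem?_eq_getElem hi2]
              have hdropi1 : s.drop (i + 1) = '\n' :: s.drop (i + 2) := by
                rw [List.drop_eq_getElem_cons hi2, hgetnext,
                  show i + 1 + 1 = i + 2 by omega]
              apply ih (i + 2) (i + 2) false _ (by omega) (by omega) (by simp) (by simp)
                (by intro h; simp at h)
              rw [hinv, hdrop1, hdropi, hcr, hdropi1, go_crnl, ← hseg]
              simp [pySeg_refl]
            · rw [aLoop_esc_cr s q fuel i lp parts hin hcr hnext]
              apply ih (i + 1) (i + 1) false _ (by omega) (by omega) (by simp) (by simp)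
                (by intro h; simp at h)
              rw [hinv, hdrop1, hdropi, hcr,
                go_cr_neg q _ (by rw [List.head?_drop]; exact hnext), ← hseg]
              simp [pySeg_refl]
          · rw [aLoop_esc_other s q fuel i lp parts hin hnl hcr]
            have hseg2 : pySeg s lp i ++ [s[i]] = pySeg s lp (i + 1) :=
              pySeg_snoc s lp i (by omega) hin
            apply ih (i + 1) lp false _ (by omega) (by omega) (by simp; omega) (by simp) hp
            have hred : (if (false : Bool) = true then i + 1 - 1 else i + 1) = i + 1 := by simp
            rw [hinv, hdrop1, hdropi, go_other q _ _ hnl hcr, hred, ← hseg2, ← hseg]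
            simp
      | false =>
        rw [if_neg (by simp)] at hlp hinv
        by_cases hbs : s[i] = '\\'
        · rw [aLoop_bs s q fuel i lp parts hin hbs]
          apply ih (i + 1) lp true _ (by omega) (by omega) (by simp; omega)
            (by intro _; exact ⟨by omega, by simpa [List.getElem?_eq_getElem hin] using hbs⟩) hp
          simpa using hinv
        · by_cases hq : String.ofList [s[i]] = q
          · rw [aLoop_quote s q fuel i lp parts hin hbs hq]
            have hsegi : pySeg s i (i + 1) = [s[i]] := by
              have h2 := pySeg_snoc s i i le_rfl hin
              rw [pySeg_refl] at h2
              simpa using h2.symm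
            apply ih (i + 1) i false _ (by omega) (by omega) (by simp) (by simp)
              (by intro h; simp at h)
            rw [hinv, hdropi, go_char q _ _ hbs]
            simp [hq, hsegi]
          · rw [aLoop_plain s q fuel i lp parts hin hbs hq]
            have hseg2 : pySeg s lp i ++ [s[i]] = pySeg s lp (i + 1) :=
              pySeg_snoc s lp i hlp hin
            apply ih (i + 1) lp false _ (by omega) (by omega) (by simp; omega) (by simp) hp
            have hred : (if (false : Bool) = true then i + 1 - 1 else i + 1) = i + 1 := by simp
            rw [hinv, hdropi, go_char q _ _ hbs, if_neg hq, hred, ← hseg2]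
            simp
    · rw [aLoop_stop s q fuel _ _ _ _ hin]
      have hieq : i = s.length := by omega
      subst hieq
      exact aLoop_go_base s q lp esc parts hlp hesc hp hinv

-- ===== VERDICT (by name: the statement is the Claim_ definition above) =====
theorem escape_quote_spec : Claim_equal_escape_quote := by
  unfold Claim_equal_escape_quote
  intro string quote _
  unfold Spec_escape_quote escape_quote escape_quote_alt
  have h := aLoop_go string.toList quote string.toList.length 0 0 false []
    (by omega) (by omega) (by simp) (by simp) (by intro _; rfl)
    (by simp [pySeg_refl])
  by_cases hc : (aLoop string.toList quote string.toList.length 0 false 0 []).1.length > 0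
  · rw [if_pos hc] at h ⊢
    rw [h]
  · rw [if_neg hc] at h ⊢
    have h2 : String.ofList string.toList
        = String.ofList (bLoop quote [] string.toList) := congrArg _ h
    rw [String.ofList_toList] at h2
    exact h2
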